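-- pv_equiv track=rewrite | github.com/jason-dio-so/insurance-ontology-v3 | utils/test_form_parser.py | match_header_data_rows
-- ===== SOURCE A (Python) =====
-- from typing import List, Dict, Any, Tuple
--
-- def match_header_data_rows(header_row: List[str], data_row: List[str]) -> List[Tuple[str, str]]:
--     """
--     헤더행과 데이터행을 매칭하여 키-값 쌍 추출
--
--     로직: 열 위치 기준으로 가장 가까운 헤더-값 매칭
--     """
--     pairs = []
--
--     header_cells = [(i, c.strip()) for i, c in enumerate(header_row) if c.strip()]
--     data_cells = [(i, c.strip()) for i, c in enumerate(data_row) if c.strip()]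
--
--     # 각 데이터 셀에 대해 가장 가까운 헤더 찾기
--     used_headers = set()
--
--     for data_idx, data_val in data_cells:
--         best_header = None
--         best_distance = float('inf')
--
--         for header_idx, header_text in header_cells:
--             if header_idx in used_headers:
--                 continue
--
--             distance = abs(data_idx - header_idx)
--             if distance < best_distance:
--                 best_distance = distance
--                 best_header = (header_idx, header_text)
--
--         if best_header and best_distance <= 3:
--             used_headers.add(best_header[0])
--             pairs.append((best_header[1], data_val))
--
--     return pairs
-- ===== SOURCE B (Python) =====
-- from typing import List, Tuple
--
-- def match_header_data_rows(header_row: List[str], data_row: List[str]) -> List[Tuple[str, str]]: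
--     """Index headers by column, then probe the 7 nearby columns per data cell (O(H+D))."""
--     headers = {}
--     for i, c in enumerate(header_row):
--         s = c.strip()
--         if s:
--             headers[i] = s
--     used = set()
--     pairs = []
--     for j, c in enumerate(data_row):
--         v = c.strip()
--         if not v:
--             continue
--         for off in (0, -1, 1, -2, 2, -3, 3):
--             k = j + off
--             if k in headers and k not in used:
--                 used.add(k)
--                 pairs.append((headers[k], v))
--                 break
--     return pairs
-- ===== Notes on version B (the rewrite author's own statement) =====
-- stated objective: faster
-- what changed: Instead of scanning all header cells for every data cell, B indexes stripped headers by column in a dict once and resolves each data cell with a constant 7-offset probe (0,-1,1,-2,2,-3,3) for the nearest unused header within distance 3.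
import Mathlib
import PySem

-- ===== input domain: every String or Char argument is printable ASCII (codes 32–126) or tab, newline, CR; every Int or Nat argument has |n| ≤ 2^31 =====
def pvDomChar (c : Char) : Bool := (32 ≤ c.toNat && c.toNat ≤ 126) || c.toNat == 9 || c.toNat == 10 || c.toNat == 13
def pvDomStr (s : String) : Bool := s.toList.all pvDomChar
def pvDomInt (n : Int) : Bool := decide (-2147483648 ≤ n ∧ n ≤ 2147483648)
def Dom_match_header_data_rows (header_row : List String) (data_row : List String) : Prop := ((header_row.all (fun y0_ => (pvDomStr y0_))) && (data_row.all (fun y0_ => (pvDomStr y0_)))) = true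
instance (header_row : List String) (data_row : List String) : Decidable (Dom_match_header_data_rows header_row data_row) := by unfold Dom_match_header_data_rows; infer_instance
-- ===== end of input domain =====

-- B replaces A's per-data-cell linear scan over all header cells with a dict of headers
-- keyed by column plus a constant 7-offset probe in distance order.

-- ===== PORT A =====
-- [(i, c.strip()) for i, c in enumerate(row) if c.strip()]  (A builds both rows' cells this way)
def pvACells (row : List String) : List (Int × String) :=
  (PySem.List.enumerate row).filterMap
    (fun p => if PySem.Str.strip p.2 ≠ "" then some (p.1, PySem.Str.strip p.2) else none)

-- body of A's inner 'for header_idx, header_text in header_cells' loop; float('inf') as the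
-- initial best_distance is modelled by 'none' (any distance beats it)
def pvAF (u : PySem.Set Int) (d : Int) (b : Option (Int × String) × Option Int)
    (q : Int × String) : Option (Int × String) × Option Int :=
  if PySem.Set.contains u q.1 then b
  else
    match b.2 with
    | none => (some q, some |d - q.1|)
    | some m => if |d - q.1| < m then (some q, some |d - q.1|) else b

-- A's inner scan: (best_header, best_distance) after the loop
def pvAInner (hc : List (Int × String)) (u : PySem.Set Int) (d : Int) :
    Option (Int × String) × Option Int :=
  hc.foldl (pvAF u d) (none, none)

-- body of A's outer loop; the '(some bh, none)' case is unreachable (best_header is set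
-- together with best_distance), so the catch-all '_ => st' fires only for best_header = None
def pvAStep (hc : List (Int × String)) (st : PySem.Set Int × List (String × String))
    (dc : Int × String) : PySem.Set Int × List (String × String) :=
  match pvAInner hc st.1 dc.1 with
  | (some bh, some bd) =>
      if bd ≤ 3 then (PySem.Set.add st.1 bh.1, st.2 ++ [(bh.2, dc.2)]) else st
  | _ => st

def match_header_data_rows (header_row : List String) (data_row : List String) :
    List (String × String) :=
  ((pvACells data_row).foldl (pvAStep (pvACells header_row)) (PySem.Set.empty, [])).2

-- ===== PORT B =====
def pvBHeaders (header_row : List String) : PySem.Dict Int String :=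
  (PySem.List.enumerate header_row).foldl
    (fun d p =>
      if PySem.Str.strip p.2 = "" then d else d.insert p.1 (PySem.Str.strip p.2))
    PySem.Dict.empty

def pvBOffsets : List Int := [0, -1, 1, -2, 2, -3, 3]

-- body of B's loop; 'for off in …: if …: …; break' is find?; Python's 'headers[k]' is getD
-- with an arbitrary default ("") since find? only returns keys present in the dict
def pvBStep (headers : PySem.Dict Int String) (st : PySem.Set Int × List (String × String))
    (p : Int × String) : PySem.Set Int × List (String × String) :=
  let v := PySem.Str.strip p.2
  if v = "" then st
  else
    match pvBOffsets.find?
        (fun o => headers.contains (p.1 + o) && !(PySem.Set.contains st.1 (p.1 + o))) with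
    | some o => (PySem.Set.add st.1 (p.1 + o), st.2 ++ [(headers.getD (p.1 + o) "", v)])
    | none => st

def match_header_data_rows_alt (header_row : List String) (data_row : List String) :
    List (String × String) :=
  ((PySem.List.enumerate data_row).foldl (pvBStep (pvBHeaders header_row))
    (PySem.Set.empty, [])).2

-- ===== PRECONDITION & SPEC =====
def Spec_match_header_data_rows (header_row : List String) (data_row : List String) (out : List (String × String)) : Prop := out = match_header_data_rows_alt header_row data_row
instance (header_row : List String) (data_row : List String) (out : List (String × String)) : Decidable (Spec_match_header_data_rows header_row data_row out) := by unfold Spec_match_header_data_rows; infer_instance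

-- ===== CLAIM (what is proved, stated in full; the proofs are below) =====
def Claim_equal_match_header_data_rows : Prop := ∀ (header_row : List String) (data_row : List String), Dom_match_header_data_rows header_row data_row → Spec_match_header_data_rows header_row data_row (match_header_data_rows header_row data_row)

-- ===== LEMMAS AND PROOFS =====
theorem pvACells_pairwise (row : List String) :
    (pvACells row).Pairwise (fun p q : Int × String => p.1 < q.1) := by
  unfold pvACells
  rw [List.pairwise_filterMap]
  refine (PySem.List.pairwise_lt_enumerate row 0).imp_of_mem ?_
  intro p q _ _ h x hx y hy
  split_ifs at hx hy <;> simp_all <;> subst hx <;> subst hy <;> exact h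

theorem pvFoldInsert (l : List (Int × String)) (d : PySem.Dict Int String) :
    l.foldl (fun d p => if PySem.Str.strip p.2 = "" then d else d.insert p.1 (PySem.Str.strip p.2)) d
    = (l.filterMap (fun p => if PySem.Str.strip p.2 ≠ "" then some (p.1, PySem.Str.strip p.2) else none)).foldl (fun d q => d.insert q.1 q.2) d := by
  induction l generalizing d with
  | nil => rfl
  | cons a l ih =>
    by_cases h : PySem.Str.strip a.2 = "" <;>
      simp [List.filterMap_cons, h, ih]

theorem pvACells_map_fst_nodup (row : List String) : ((pvACells row).map Prod.fst).Nodup := by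
  have := pvACells_pairwise row
  have h2 : ((pvACells row).map Prod.fst).Pairwise (· < ·) := List.Pairwise.map _ (fun a b h => h) this
  exact h2.imp ne_of_lt

theorem pvBHeaders_items (hr : List String) : (pvBHeaders hr).items = pvACells hr := by
  unfold pvBHeaders
  rw [pvFoldInsert, ← pvACells]
  have h := PySem.Dict.items_foldl_insert_fresh (l := pvACells hr) (d := PySem.Dict.empty)
    (k := fun q => q.1) (v := fun q => q.2) (by simp [PySem.Dict.contains_empty]) (pvACells_map_fst_nodup hr)
  simpa using h

theorem pvBHeaders_keys_nodup (hr : List String) : (pvBHeaders hr).keys.Nodup := by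
  have : (pvBHeaders hr).keys = (pvACells hr).map Prod.fst := by
    simp only [PySem.Dict.keys, pvBHeaders_items]
  rw [this]; exact pvACells_map_fst_nodup hr

theorem pvBHeaders_get? (hr : List String) (k : Int) (t : String) :
    (pvBHeaders hr).get? k = some t ↔ (k, t) ∈ pvACells hr := by
  exact (PySem.Dict.get?_eq_some_iff_mem_items _ k t (pvBHeaders_keys_nodup hr)).trans (by rw [pvBHeaders_items])



theorem pvAF_fold_some (u : PySem.Set Int) (d : Int) :
  ∀ (l : List (Int × String)) (p0 : Int × String),
    l.Pairwise (fun p q => p.1 < q.1) → (∀ q ∈ l, p0.1 < q.1) →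
    ∃ p, l.foldl (pvAF u d) (some p0, some |d - p0.1|) = (some p, some |d - p.1|)
      ∧ (p = p0 ∨ (p ∈ l ∧ PySem.Set.contains u p.1 = false))
      ∧ (|d - p.1| < |d - p0.1| ∨ (|d - p.1| = |d - p0.1| ∧ p.1 ≤ p0.1))
      ∧ ∀ q ∈ l, PySem.Set.contains u q.1 = false →
          (|d - p.1| < |d - q.1| ∨ (|d - p.1| = |d - q.1| ∧ p.1 ≤ q.1)) := by
  intro l
  induction l with
  | nil =>
    intro p0 _ _
    exact ⟨p0, rfl, Or.inl rfl, Or.inr ⟨rfl, le_refl _⟩, by simp⟩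
  | cons a l ih =>
    intro p0 hpw hlt
    rw [List.foldl_cons]
    rcases List.pairwise_cons.mp hpw with ⟨ha, hpwl⟩
    by_cases hcont : PySem.Set.contains u a.1 = true
    · have hstep : pvAF u d (some p0, some |d - p0.1|) a = (some p0, some |d - p0.1|) := by
        simp [pvAF, (PySem.Set.contains_iff u a.1).mp hcont]
      rw [hstep]
      obtain ⟨p, h1, h2, h3, h4⟩ := ih p0 hpwl (fun q hq => hlt q (List.mem_cons_of_mem _ hq))
      refine ⟨p, h1, ?_, h3, ?_⟩
      · rcases h2 with h | ⟨hm, hu⟩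
        · exact Or.inl h
        · exact Or.inr ⟨List.mem_cons_of_mem _ hm, hu⟩
      · intro q hq hqu
        rcases List.mem_cons.mp hq with rfl | hq'
        · rw [hcont] at hqu; cases hqu
        · exact h4 q hq' hqu
    · rw [Bool.not_eq_true] at hcont
      have hnm : a.1 ∉ u := fun h => by rw [(PySem.Set.contains_iff u a.1).mpr h] at hcont; cases hcont
      by_cases hd : |d - a.1| < |d - p0.1|
      · have hstep : pvAF u d (some p0, some |d - p0.1|) a = (some a, some |d - a.1|) := by
          simp [pvAF, hnm, hd]
        rw [hstep]
        obtain ⟨p, h1, h2, h3, h4⟩ := ih a hpwl ha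
        refine ⟨p, h1, ?_, ?_, ?_⟩
        · rcases h2 with rfl | ⟨hm, hu⟩
          · exact Or.inr ⟨List.mem_cons_self, hcont⟩
          · exact Or.inr ⟨List.mem_cons_of_mem _ hm, hu⟩
        · left
          rcases h3 with h | ⟨he, _⟩
          · exact lt_trans h hd
          · rw [he]; exact hd
        · intro q hq hqu
          rcases List.mem_cons.mp hq with rfl | hq'
          · exact h3
          · exact h4 q hq' hqu
      · have hstep : pvAF u d (some p0, some |d - p0.1|) a = (some p0, some |d - p0.1|) := by
          simp [pvAF, hnm, hd]
        rw [hstep]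
        obtain ⟨p, h1, h2, h3, h4⟩ := ih p0 hpwl (fun q hq => hlt q (List.mem_cons_of_mem _ hq))
        refine ⟨p, h1, ?_, h3, ?_⟩
        · rcases h2 with h | ⟨hm, hu⟩
          · exact Or.inl h
          · exact Or.inr ⟨List.mem_cons_of_mem _ hm, hu⟩
        · intro q hq hqu
          rcases List.mem_cons.mp hq with rfl | hq'
          · have hpa : p0.1 < q.1 := hlt q List.mem_cons_self
            simp only [Int.abs_eq_natAbs] at *
            omega
          · exact h4 q hq' hqu

theorem pvAInner_spec (hc : List (Int × String))
    (hpw : hc.Pairwise (fun p q : Int × String => p.1 < q.1))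
    (u : PySem.Set Int) (d : Int) :
    (pvAInner hc u d = (none, none) ∧ ∀ q ∈ hc, PySem.Set.contains u q.1 = true)
    ∨ ∃ p, pvAInner hc u d = (some p, some |d - p.1|) ∧ p ∈ hc
        ∧ PySem.Set.contains u p.1 = false
        ∧ ∀ q ∈ hc, PySem.Set.contains u q.1 = false →
            (|d - p.1| < |d - q.1| ∨ (|d - p.1| = |d - q.1| ∧ p.1 ≤ q.1)) := by
  induction hc with
  | nil => exact Or.inl ⟨rfl, by simp⟩
  | cons a l ih =>
    rcases List.pairwise_cons.mp hpw with ⟨ha, hpwl⟩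
    unfold pvAInner
    rw [List.foldl_cons]
    by_cases hcont : PySem.Set.contains u a.1 = true
    · have hstep : pvAF u d (none, none) a = (none, none) := by simp [pvAF, (PySem.Set.contains_iff u a.1).mp hcont]
      rw [hstep]
      rcases ih hpwl with ⟨h1, h2⟩ | ⟨p, h1, h2, h3, h4⟩
      · left
        refine ⟨h1, ?_⟩
        intro q hq
        rcases List.mem_cons.mp hq with rfl | hq'
        · exact hcont
        · exact h2 q hq'
      · right
        refine ⟨p, h1, List.mem_cons_of_mem _ h2, h3, ?_⟩
        intro q hq hqu
        rcases List.mem_cons.mp hq with rfl | hq'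
        · rw [hcont] at hqu; cases hqu
        · exact h4 q hq' hqu
    · rw [Bool.not_eq_true] at hcont
      have hnm : a.1 ∉ u := fun h => by rw [(PySem.Set.contains_iff u a.1).mpr h] at hcont; cases hcont
      have hstep : pvAF u d (none, none) a = (some a, some |d - a.1|) := by
        simp [pvAF, hnm]
      rw [hstep]
      obtain ⟨p, h1, h2, h3, h4⟩ := pvAF_fold_some u d l a hpwl ha
      right
      refine ⟨p, h1, ?_, ?_, ?_⟩
      · rcases h2 with rfl | ⟨hm, _⟩
        · exact List.mem_cons_self
        · exact List.mem_cons_of_mem _ hm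
      · rcases h2 with rfl | ⟨_, hu⟩
        · exact hcont
        · exact hu
      · intro q hq hqu
        rcases List.mem_cons.mp hq with rfl | hq'
        · exact h3
        · exact h4 q hq' hqu




def pvBStepC (headers : PySem.Dict Int String) (st : PySem.Set Int × List (String × String))
    (q : Int × String) : PySem.Set Int × List (String × String) :=
  match pvBOffsets.find?
      (fun o => headers.contains (q.1 + o) && !(PySem.Set.contains st.1 (q.1 + o))) with
  | some o => (PySem.Set.add st.1 (q.1 + o), st.2 ++ [(headers.getD (q.1 + o) "", q.2)])
  | none => st

theorem pvBStep_foldl (headers : PySem.Dict Int String) :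
    ∀ (l : List (Int × String)) (init : PySem.Set Int × List (String × String)),
    l.foldl (pvBStep headers) init
      = (l.filterMap (fun p => if PySem.Str.strip p.2 ≠ "" then some (p.1, PySem.Str.strip p.2) else none)).foldl
          (pvBStepC headers) init := by
  intro l
  induction l with
  | nil => intro init; rfl
  | cons a l ih =>
    intro init
    by_cases h : PySem.Str.strip a.2 = ""
    · simp [List.foldl_cons, List.filterMap_cons, h, pvBStep, ih]
    · simp only [List.foldl_cons, List.filterMap_cons, if_pos h, ih]
      simp [pvBStep, pvBStepC, h]

theorem step_eq (hr : List String) (st : PySem.Set Int × List (String × String))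
    (q : Int × String) :
    pvAStep (pvACells hr) st q = pvBStepC (pvBHeaders hr) st q := by
  obtain ⟨k, v⟩ := q
  have hpw := pvACells_pairwise hr
  have hvalid : ∀ o : Int,
      ((pvBHeaders hr).contains (k + o) && !(PySem.Set.contains st.1 (k + o))) = true →
      ∃ t, (k + o, t) ∈ pvACells hr ∧ PySem.Set.contains st.1 (k + o) = false := by
    intro o ho
    rw [Bool.and_eq_true, Bool.not_eq_true'] at ho
    obtain ⟨hc1, hc2⟩ := ho
    rw [PySem.Dict.contains_eq_isSome_get?, Option.isSome_iff_exists] at hc1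
    obtain ⟨t, ht⟩ := hc1
    exact ⟨t, (pvBHeaders_get? hr _ t).mp ht, hc2⟩
  rcases pvAInner_spec (pvACells hr) hpw st.1 k with ⟨h1, h2⟩ | ⟨p, h1, h2, h3, h4⟩
  · have hfind : pvBOffsets.find?
        (fun o => (pvBHeaders hr).contains (k + o) && !(PySem.Set.contains st.1 (k + o))) = none := by
      rw [List.find?_eq_none]
      intro o _ hpred
      obtain ⟨t, hmem, hunused⟩ := hvalid o hpred
      rw [h2 (k + o, t) hmem] at hunused
      cases hunused
    simp only [pvAStep, pvBStepC, h1]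
    rw [hfind]
  · -- best exists
    have hgetp : (pvBHeaders hr).get? p.1 = some p.2 := (pvBHeaders_get? hr p.1 p.2).mpr h2
    have hnot : ∀ o : Int, (|o| < |k - p.1| ∨ (|o| = |k - p.1| ∧ k + o < p.1)) →
        ((pvBHeaders hr).contains (k + o) && !(PySem.Set.contains st.1 (k + o))) = false := by
      intro o ho
      by_contra hcon
      rw [Bool.not_eq_false] at hcon
      obtain ⟨t, hmem, hunused⟩ := hvalid o hcon
      have := h4 (k + o, t) hmem hunused
      simp only [Int.abs_eq_natAbs] at ho this
      omega
    by_cases hle : |k - p.1| ≤ 3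
    · have hpredstar :
          ((pvBHeaders hr).contains (k + (p.1 - k)) && !(PySem.Set.contains st.1 (k + (p.1 - k)))) = true := by
        have hk : k + (p.1 - k) = p.1 := by ring
        rw [hk, PySem.Dict.contains_eq_isSome_get?, hgetp, h3]
        rfl
      have hcases : p.1 - k = 0 ∨ p.1 - k = -1 ∨ p.1 - k = 1 ∨ p.1 - k = -2 ∨ p.1 - k = 2 ∨
          p.1 - k = -3 ∨ p.1 - k = 3 := by
        simp only [Int.abs_eq_natAbs] at hle; omega
      have hfind : pvBOffsets.find?
          (fun o => (pvBHeaders hr).contains (k + o) && !(PySem.Set.contains st.1 (k + o)))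
          = some (p.1 - k) := by
        simp only [Int.abs_eq_natAbs] at hle
        rw [show pvBOffsets = [0,-1,1,-2,2,-3,3] from rfl]
        rcases hcases with h | h | h | h | h | h | h <;>
          · rw [h] at hpredstar ⊢
            repeat first
              | exact List.find?_cons_of_pos (by exact hpredstar)
              | rw [List.find?_cons_of_neg (by
                  rw [Bool.not_eq_true]
                  exact hnot _ (by simp only [Int.abs_eq_natAbs]; omega))]
      have hk : k + (p.1 - k) = p.1 := by ring
      simp only [pvAStep, pvBStepC, h1, hfind, hk, if_pos hle,
        PySem.Dict.getD_eq_get?_getD, hgetp, Option.getD_some]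
    · have hfind : pvBOffsets.find?
          (fun o => (pvBHeaders hr).contains (k + o) && !(PySem.Set.contains st.1 (k + o))) = none := by
        rw [List.find?_eq_none]
        intro o ho hpred
        have ho3 : |o| ≤ 3 := by
          simp only [pvBOffsets, List.mem_cons, List.not_mem_nil, or_false] at ho
          rcases ho with rfl | rfl | rfl | rfl | rfl | rfl | rfl <;> decide
        rw [hnot o (Or.inl (by simp only [Int.abs_eq_natAbs] at hle ho3 ⊢; omega))] at hpred
        cases hpred
      simp only [pvAStep, pvBStepC, h1, if_neg hle]
      rw [hfind]


theorem foldl_steps_eq (header_row data_row : List String) :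
    (pvACells data_row).foldl (pvAStep (pvACells header_row)) (PySem.Set.empty, [])
      = (pvACells data_row).foldl (pvBStepC (pvBHeaders header_row)) (PySem.Set.empty, []) :=
  PySem.List.foldl_congr_mem _ _ _ _ (fun acc x _ => step_eq header_row acc x)

-- ===== VERDICT (by name: the statement is the Claim_ definition above) =====
theorem match_header_data_rows_spec : Claim_equal_match_header_data_rows := by
  intro header_row data_row _
  unfold Spec_match_header_data_rows match_header_data_rows match_header_data_rows_alt
  rw [pvBStep_foldl, foldl_steps_eq]
  rfl
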